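-- pv_equiv track=rewrite | github.com/NLPerWS/KMatrix | kninjllm/llm_chunk/document_splitter.py | _split_into_units
-- ===== SOURCE A (Python) =====
-- from typing import List, Literal
--
-- def _split_into_units(text: str, split_by: Literal["word", "sentence", "passage", "page"]) -> List[str]:
--     if split_by == "page":
--         split_at = "\f"
--     elif split_by == "passage":
--         split_at = "\n\n"
--     elif split_by == "sentence":
--         split_at = "."
--     elif split_by == "word":
--         split_at = " "
--     elif split_by == "charListAndmaxLength":
--         split_at = " "
--     else:
--         raise NotImplementedError(
--             "DocumentSplitter only supports 'word', 'sentence', 'page' or 'passage' split_by options."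
--         )
--     units = text.split(split_at)
--
--     for i in range(len(units) - 1):
--         units[i] += split_at
--     return units
-- ===== SOURCE B (Python) =====
-- from typing import List, Literal
--
-- def _split_into_units(text: str, split_by: Literal["word", "sentence", "passage", "page"]) -> List[str]:
--     if split_by == "page":
--         split_at = "\f"
--     elif split_by == "passage":
--         split_at = "\n\n"
--     elif split_by == "sentence":
--         split_at = "."
--     elif split_by == "word":
--         split_at = " "
--     elif split_by == "charListAndmaxLength":
--         split_at = " "
--     else:
--         raise NotImplementedError(
--             "DocumentSplitter only supports 'word', 'sentence', 'page' or 'passage' split_by options."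
--         )
--     units = []
--     rest = text
--     while True:
--         idx = rest.find(split_at)
--         if idx == -1:
--             units.append(rest)
--             return units
--         cut = idx + len(split_at)
--         units.append(rest[:cut])
--         rest = rest[cut:]
-- ===== Notes on version B (the rewrite author's own statement) =====
-- stated objective: alternative
-- what changed: Replaced the split-then-reattach two-pass body (str.split followed by a loop appending the delimiter back onto every unit but the last) with a single-pass find/slice scan that emits each delimiter-terminated unit directly.
import Mathlib
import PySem

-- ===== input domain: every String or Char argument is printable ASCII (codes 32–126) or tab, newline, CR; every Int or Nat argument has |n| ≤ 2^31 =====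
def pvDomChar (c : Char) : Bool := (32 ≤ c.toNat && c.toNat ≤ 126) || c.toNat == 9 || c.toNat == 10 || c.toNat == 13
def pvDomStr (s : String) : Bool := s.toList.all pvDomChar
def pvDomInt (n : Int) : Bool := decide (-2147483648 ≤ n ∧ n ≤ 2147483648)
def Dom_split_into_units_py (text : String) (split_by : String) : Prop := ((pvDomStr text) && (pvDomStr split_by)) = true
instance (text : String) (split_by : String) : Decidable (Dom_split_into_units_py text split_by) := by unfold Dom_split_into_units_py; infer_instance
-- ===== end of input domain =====

-- B replaces A's split-then-reattach two-pass body with a single-pass find/slice scan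
-- emitting each delimiter-terminated unit directly; return values agree on Pre_.

-- ===== PORT A =====
-- literal port of A: dispatch the delimiter, str.split, then the reattach loop
-- `for i in range(len(units) - 1): units[i] += split_at`
def split_into_units_py (text : String) (split_by : String) : List String :=
  let sep? : Option (List Char) :=
    if split_by = "page" then some [Char.ofNat 12]
    else if split_by = "passage" then some ['\n', '\n']
    else if split_by = "sentence" then some ['.']
    else if split_by = "word" then some [' ']
    else if split_by = "charListAndmaxLength" then some [' ']
    else none   -- Python raises NotImplementedError here; excluded by Pre_
  match sep? with
  | none => []
  | some sep =>
    let units := PySem.Chars.splitOn text.toList sep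
    let units :=
      (PySem.List.pyRange 0 ((units.length : Int) - 1) 1).foldl
        (fun us i => us.modify i.toNat (· ++ sep)) units
    units.map String.ofList

-- ===== PORT B =====
-- B's scan loop: find the delimiter in the rest, cut the delimiter-terminated unit off;
-- the fuel argument only totalises the loop (rest strictly shrinks while fuel > rest.length)
def pvScan (sep : List Char) : List Char → Nat → List (List Char)
  | rest, 0 => [rest]
  | rest, fuel + 1 =>
    let idx := PySem.Chars.find rest sep
    if idx = -1 then [rest]
    else
      let cut := idx.toNat + sep.length
      rest.take cut :: pvScan sep (rest.drop cut) fuel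

def split_into_units_py_alt (text : String) (split_by : String) : List String :=
  let sep? : Option (List Char) :=
    if split_by = "page" then some [Char.ofNat 12]
    else if split_by = "passage" then some ['\n', '\n']
    else if split_by = "sentence" then some ['.']
    else if split_by = "word" then some [' ']
    else if split_by = "charListAndmaxLength" then some [' ']
    else none   -- Python raises NotImplementedError here; excluded by Pre_
  match sep? with
  | none => []
  | some sep => (pvScan sep text.toList (text.toList.length + 1)).map String.ofList

-- ===== PRECONDITION & SPEC =====
-- Pre_ admits exactly the split_by values A's if/elif chain accepts; on any other
-- split_by the Python A raises NotImplementedError.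
def Pre_split_into_units_py (text : String) (split_by : String) : Prop :=
  split_by = "word" ∨ split_by = "sentence" ∨ split_by = "passage" ∨
  split_by = "page" ∨ split_by = "charListAndmaxLength"
instance (text : String) (split_by : String) : Decidable (Pre_split_into_units_py text split_by) := by
  unfold Pre_split_into_units_py; infer_instance

def pvWitness_split_into_units_py : String × String := ("a b c", "word")

def Spec_split_into_units_py (text : String) (split_by : String) (out : List String) : Prop := out = split_into_units_py_alt text split_by
instance (text : String) (split_by : String) (out : List String) : Decidable (Spec_split_into_units_py text split_by out) := by unfold Spec_split_into_units_py; infer_instance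

-- ===== CLAIM (what is proved, stated in full; the proofs are below) =====
def Claim_equal_split_into_units_py : Prop := ∀ (text : String) (split_by : String), Dom_split_into_units_py text split_by → Pre_split_into_units_py text split_by → Spec_split_into_units_py text split_by (split_into_units_py text split_by)

-- ===== LEMMAS AND PROOFS =====

-- apply f to the head only
def pvMapHead (f : List Char → List Char) : List (List Char) → List (List Char)
  | [] => []
  | a :: t => f a :: t

-- fueled accumulator-free version of PySem.Chars.splitOn.go
def pvSplit1F (sep : List Char) : List Char → Nat → List (List Char)
  | _, 0 => [[]]
  | [], _ + 1 => [[]]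
  | c :: rest, fuel + 1 =>
    if sep.isPrefixOf (c :: rest) then [] :: pvSplit1F sep ((c :: rest).drop sep.length) fuel
    else pvMapHead (c :: ·) (pvSplit1F sep rest fuel)

-- append f's result for every element but the last
def pvMapInit (f : List Char → List Char) : List (List Char) → List (List Char)
  | [] => []
  | [a] => [a]
  | a :: b :: t => f a :: pvMapInit f (b :: t)

def pvSplit1 (sep l : List Char) : List (List Char) := pvSplit1F sep l (l.length + 1)

theorem pvSepLen (sep : List Char) (hsep : sep ≠ []) : 1 ≤ sep.length := by
  cases sep with
  | nil => exact absurd rfl hsep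
  | cons a t => simp

theorem pvMapHead_ne_nil (f : List Char → List Char) (xs : List (List Char)) (h : xs ≠ []) :
    pvMapHead f xs ≠ [] := by
  cases xs with
  | nil => exact absurd rfl h
  | cons a t => simp [pvMapHead]

theorem pvSplit1F_ne_nil (sep l : List Char) (fuel : Nat) : pvSplit1F sep l fuel ≠ [] := by
  induction fuel generalizing l with
  | zero => simp [pvSplit1F]
  | succ f ih =>
    cases l with
    | nil => simp [pvSplit1F]
    | cons c rest =>
      rw [pvSplit1F]
      split
      · simp
      · exact pvMapHead_ne_nil _ _ (ih rest)

theorem pvDropLen (sep : List Char) (hsep : sep ≠ []) (c : Char) (rest : List Char) (f : Nat)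
    (h : rest.length ≤ f) : ((c :: rest).drop sep.length).length ≤ f := by
  have h1 : ((c :: rest).drop sep.length).length = (rest.length + 1) - sep.length := by simp
  have h2 := pvSepLen sep hsep
  omega

theorem pvSplit1F_irrel (sep : List Char) (hsep : sep ≠ []) :
    ∀ (fuel : Nat) (l : List Char) (fuel' : Nat), l.length ≤ fuel → l.length ≤ fuel' →
    pvSplit1F sep l fuel = pvSplit1F sep l fuel' := by
  intro fuel
  induction fuel with
  | zero =>
    intro l fuel' h1 _
    have hl : l = [] := List.eq_nil_of_length_eq_zero (Nat.le_zero.mp h1)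
    subst hl
    cases fuel' <;> simp [pvSplit1F]
  | succ f ih =>
    intro l fuel' h1 h2
    cases l with
    | nil => cases fuel' <;> simp [pvSplit1F]
    | cons c rest =>
      cases fuel' with
      | zero => simp at h2
      | succ g =>
        rw [pvSplit1F, pvSplit1F]
        by_cases hp : sep.isPrefixOf (c :: rest)
        · simp only [hp, if_true]
          have hr : rest.length ≤ f := by simp at h1; omega
          have hr' : rest.length ≤ g := by simp at h2; omega
          rw [ih _ g (pvDropLen sep hsep c rest f hr) (pvDropLen sep hsep c rest g hr')]
        · simp only [hp]
          have hr : rest.length ≤ f := by simp at h1; omega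
          have hr' : rest.length ≤ g := by simp at h2; omega
          rw [ih rest g hr hr']
          simp

theorem pvSplit1F_eq_pvSplit1 (sep : List Char) (hsep : sep ≠ []) (l : List Char) (fuel : Nat)
    (h : l.length ≤ fuel) : pvSplit1F sep l fuel = pvSplit1 sep l :=
  pvSplit1F_irrel sep hsep fuel l (l.length + 1) h (Nat.le_succ _)

-- the accumulator invariant of PySem.Chars.splitOn.go
theorem pvGo_eq (sep : List Char) (hsep : sep ≠ []) :
    ∀ (fuel : Nat) (l cur : List Char) (acc : List (List Char)), l.length ≤ fuel →
    PySem.Chars.splitOn.go sep fuel l cur acc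
      = acc.reverse ++ pvMapHead (cur.reverse ++ ·) (pvSplit1F sep l fuel) := by
  intro fuel
  induction fuel with
  | zero =>
    intro l cur acc h1
    have hl : l = [] := List.eq_nil_of_length_eq_zero (Nat.le_zero.mp h1)
    subst hl
    simp [PySem.Chars.splitOn.go, pvSplit1F, pvMapHead]
  | succ f ih =>
    intro l cur acc h1
    cases l with
    | nil => simp [PySem.Chars.splitOn.go, pvSplit1F, pvMapHead]
    | cons c rest =>
      rw [PySem.Chars.splitOn.go, pvSplit1F]
      by_cases hp : sep.isPrefixOf (c :: rest)
      · simp only [hp, if_true]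
        have hr : rest.length ≤ f := by simp at h1; omega
        rw [ih _ [] (cur.reverse :: acc) (pvDropLen sep hsep c rest f hr)]
        cases hq : pvSplit1F sep ((c :: rest).drop sep.length) f with
        | nil => exact absurd hq (pvSplit1F_ne_nil sep _ f)
        | cons a t => simp [pvMapHead]
      · simp only [hp]
        have hr : rest.length ≤ f := by simp at h1; omega
        rw [ih rest (c :: cur) acc hr]
        cases hq : pvSplit1F sep rest f with
        | nil => exact absurd hq (pvSplit1F_ne_nil sep rest f)
        | cons a t => simp [pvMapHead]

theorem pvSplitOn_eq (sep : List Char) (hsep : sep ≠ []) (l : List Char) :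
    PySem.Chars.splitOn l sep = pvSplit1 sep l := by
  show PySem.Chars.splitOn.go sep (l.length + 1) l [] [] = _
  rw [pvGo_eq sep hsep (l.length + 1) l [] [] (Nat.le_succ _)]
  cases hq : pvSplit1F sep l (l.length + 1) with
  | nil => exact absurd hq (pvSplit1F_ne_nil sep l _)
  | cons a t =>
    have : pvSplit1 sep l = a :: t := hq
    simp [pvMapHead, this]

-- no occurrence of sep: one unit
theorem pvSplit1_no_occ (sep : List Char) (hsep : sep ≠ []) (l : List Char)
    (h : ¬ sep <:+: l) : pvSplit1 sep l = [l] := by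
  induction l with
  | nil => simp [pvSplit1, pvSplit1F]
  | cons c rest ih =>
    have hp : ¬ sep.isPrefixOf (c :: rest) = true := by
      intro hc
      exact h (List.isPrefixOf_iff_prefix.mp hc).isInfix
    have hr : ¬ sep <:+: rest := fun hc => h (hc.trans (List.suffix_cons c rest).isInfix)
    rw [pvSplit1, pvSplit1F]
    simp only [eq_false_of_ne_true (fun hc => hp hc), Bool.false_eq_true, if_false]
    rw [pvSplit1F_eq_pvSplit1 sep hsep rest _ (by simp), ih hr]
    rfl

-- first occurrence at i: peel off one unit
theorem pvSplit1_occ (sep : List Char) (hsep : sep ≠ []) :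
    ∀ (i : Nat) (l : List Char), sep <+: l.drop i → (∀ j < i, ¬ sep <+: l.drop j) →
    pvSplit1 sep l = l.take i :: pvSplit1 sep (l.drop (i + sep.length)) := by
  intro i
  induction i with
  | zero =>
    intro l hpre _
    simp only [List.drop_zero] at hpre
    have hl : l ≠ [] := by
      intro h; subst h
      exact hsep (List.prefix_nil.mp hpre)
    cases l with
    | nil => exact absurd rfl hl
    | cons c rest =>
      rw [pvSplit1, pvSplit1F]
      have hp : sep.isPrefixOf (c :: rest) = true := List.isPrefixOf_iff_prefix.mpr hpre
      simp only [hp, if_true, List.take_zero, Nat.zero_add]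
      congr 1
      exact pvSplit1F_eq_pvSplit1 sep hsep _ _ (by simp only [List.length_drop, List.length_cons]; omega)
  | succ i ih =>
    intro l hpre hmin
    have hne : l ≠ [] := by
      intro h; subst h
      simp only [List.drop_nil] at hpre
      exact hsep (List.prefix_nil.mp hpre)
    cases l with
    | nil => exact absurd rfl hne
    | cons c rest =>
      have hp : ¬ sep.isPrefixOf (c :: rest) = true := by
        intro hc
        exact hmin 0 (Nat.succ_pos i) (by simpa using List.isPrefixOf_iff_prefix.mp hc)
      rw [pvSplit1, pvSplit1F]
      simp only [eq_false_of_ne_true (fun hc => hp hc), Bool.false_eq_true, if_false]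
      rw [pvSplit1F_eq_pvSplit1 sep hsep rest _ (by simp)]
      rw [ih rest (by simpa using hpre) (fun j hj => by simpa using hmin (j + 1) (by omega))]
      simp [pvMapHead, List.take_succ_cons, List.drop_succ_cons, Nat.succ_add]

-- the reattach loop over List.range is pvMapInit
theorem pvFoldl_modify_cons (f : List Char → List Char) (r : List Nat) :
    ∀ (x : List Char) (t : List (List Char)),
    r.foldl (fun acc i => acc.modify (i + 1) f) (x :: t)
      = x :: r.foldl (fun acc i => acc.modify i f) t := by
  induction r with
  | nil => intro x t; rfl
  | cons i r ih =>
    intro x t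
    simp only [List.foldl_cons]
    rw [show (x :: t).modify (i + 1) f = x :: t.modify i f by simp]
    exact ih x (t.modify i f)

theorem pvRangeFoldl_eq_mapInit (f : List Char → List Char) (us : List (List Char)) :
    (List.range (us.length - 1)).foldl (fun acc i => acc.modify i f) us = pvMapInit f us := by
  induction us with
  | nil => rfl
  | cons a t ih =>
    cases t with
    | nil => rfl
    | cons b t' =>
      have hlen : (a :: b :: t').length - 1 = (b :: t').length - 1 + 1 := by simp
      rw [hlen, List.range_succ_eq_map]
      simp only [List.foldl_cons, List.foldl_map]
      rw [show (a :: b :: t').modify 0 f = f a :: b :: t' by simp [List.modify_cons]]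
      have hc := pvFoldl_modify_cons f (List.range ((b :: t').length - 1)) (f a) (b :: t')
      simp only [Nat.succ_eq_add_one] at hc ⊢
      rw [hc, ih]
      rfl

-- one unit of pvMapInit when the tail is nonempty
theorem pvMapInit_cons (f : List Char → List Char) (a : List Char) (t : List (List Char))
    (h : t ≠ []) : pvMapInit f (a :: t) = f a :: pvMapInit f t := by
  cases t with
  | nil => exact absurd rfl h
  | cons b t' => rfl

theorem pvSplit1_ne_nil (sep l : List Char) : pvSplit1 sep l ≠ [] :=
  pvSplit1F_ne_nil sep l (l.length + 1)

-- core equivalence: reattached split equals the single-pass scan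
theorem pvMapInit_split1_eq_scan (sep : List Char) (hsep : sep ≠ []) :
    ∀ (fuel : Nat) (l : List Char), l.length < fuel →
    pvMapInit (· ++ sep) (pvSplit1 sep l) = pvScan sep l fuel := by
  intro fuel
  induction fuel with
  | zero => intro l h; omega
  | succ f ih =>
    intro l h
    rw [pvScan]
    by_cases hfind : PySem.Chars.find l sep = -1
    · simp only [hfind, if_true]
      rw [pvSplit1_no_occ sep hsep l ((PySem.Chars.find_eq_neg_one_iff l sep).mp hfind)]
      rfl
    · simp only [hfind, if_false]
      have hnn : 0 ≤ PySem.Chars.find l sep := by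
        have := PySem.Chars.neg_one_le_find (s := l) (sub := sep)
        omega
      obtain ⟨hpre, hmin⟩ := PySem.Chars.find_spec hnn
      set i := (PySem.Chars.find l sep).toNat with hi
      rw [pvSplit1_occ sep hsep i l hpre hmin]
      have hlen : i + sep.length ≤ l.length := by
        have h1 := hpre.length_le
        simp only [List.length_drop] at h1
        have hm := pvSepLen sep hsep
        omega
      have hm := pvSepLen sep hsep
      rw [pvMapInit_cons _ _ _ (pvSplit1_ne_nil sep _)]
      have htake : l.take i ++ sep = l.take (i + sep.length) := by
        obtain ⟨r, hr⟩ := hpre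
        rw [List.take_add, ← hr]
        congr 1
        exact List.take_left.symm
      rw [htake]
      congr 1
      exact ih (l.drop (i + sep.length)) (by simp only [List.length_drop]; omega)

-- A's whole core body equals B's whole core body, for any nonempty delimiter
theorem pvCore_eq (sep : List Char) (hsep : sep ≠ []) (t : List Char) :
    (let units := PySem.Chars.splitOn t sep
     ((PySem.List.pyRange 0 ((units.length : Int) - 1) 1).foldl
        (fun us i => us.modify i.toNat (· ++ sep)) units))
      = pvScan sep t (t.length + 1) := by
  simp only
  rw [pvSplitOn_eq sep hsep t]
  have hpos : 1 ≤ (pvSplit1 sep t).length := by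
    cases hq : pvSplit1 sep t with
    | nil => exact absurd hq (pvSplit1_ne_nil sep t)
    | cons a l => simp
  have hcast : ((pvSplit1 sep t).length : Int) - 1 = (((pvSplit1 sep t).length - 1 : Nat) : Int) := by
    omega
  rw [hcast, PySem.List.pyRange_zero_natCast, List.foldl_map]
  simp only [Int.toNat_natCast]
  rw [pvRangeFoldl_eq_mapInit]
  exact pvMapInit_split1_eq_scan sep hsep (t.length + 1) t (Nat.lt_succ_self _)

-- ===== VERDICT (by name: the statement is the Claim_ definition above) =====
theorem split_into_units_py_spec : Claim_equal_split_into_units_py := by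
  intro text split_by _hdom hpre
  unfold Spec_split_into_units_py split_into_units_py split_into_units_py_alt
  rcases hpre with h | h | h | h | h <;> subst h <;> simp only [reduceIte] <;>
    exact congrArg (List.map String.ofList) (pvCore_eq _ (by simp) text.toList)
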